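-- pv_equiv track=rewrite | github.com/chase-stoddard/AOC_2025 | day4.py | split_problems
-- ===== SOURCE A (Python) =====
-- def split_problems(columns):
--     problems = []
--     current = []
--     for col in reversed(columns):
--         if all(c == " " for c in col):
--             if current:
--                 problems.append(list(current))
--                 current = []
--         else:
--             current.append(col)
--     if current:
--         problems.append(list(current))
--     return problems
-- ===== SOURCE B (Python) =====
-- def split_problems(columns):
--     rev = columns[::-1]
--     n = len(rev)
--     problems = []
--     i = 0
--     while i < n:
--         if all(c == " " for c in rev[i]):
--             i += 1
--         else:
--             j = i + 1
--             while j < n and not all(c == " " for c in rev[j]):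
--                 j += 1
--             problems.append(rev[i:j])
--             i = j
--     return problems
-- ===== Notes on version B (the rewrite author's own statement) =====
-- stated objective: alternative
-- what changed: Replaces A's streaming accumulator-and-flush-on-blank loop with two-pointer index scanning over the reversed list: a second index is advanced past each non-blank run and the whole run is extracted as a single slice, so there is no 'current' buffer and no flush branch.
import Mathlib
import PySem

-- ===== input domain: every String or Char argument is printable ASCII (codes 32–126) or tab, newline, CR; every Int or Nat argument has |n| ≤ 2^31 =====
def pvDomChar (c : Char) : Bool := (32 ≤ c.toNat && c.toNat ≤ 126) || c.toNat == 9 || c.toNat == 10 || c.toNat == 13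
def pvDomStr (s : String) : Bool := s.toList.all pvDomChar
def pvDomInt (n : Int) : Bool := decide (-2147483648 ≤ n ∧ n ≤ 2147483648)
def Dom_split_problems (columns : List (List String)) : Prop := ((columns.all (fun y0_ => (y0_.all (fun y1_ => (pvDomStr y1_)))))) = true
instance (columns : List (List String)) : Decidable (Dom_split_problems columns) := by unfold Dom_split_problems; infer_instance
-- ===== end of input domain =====

-- B replaces A's accumulator-and-flush loop with two-pointer index scanning and slice
-- extraction over the reversed list; equivalence of the return values is proved below.

-- ===== PORT A =====
-- all(c == " " for c in col)  (col is a list of strings; c ranges over its elements)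
def pvBlank (col : List String) : Bool := col.all (fun c => c == " ")

-- one iteration of A's 'for col in reversed(columns)' loop over the state (problems, current)
def pvStepA (st : List (List (List String)) × List (List String)) (col : List String) :
    List (List (List String)) × List (List String) :=
  if pvBlank col then
    if st.2 ≠ [] then (st.1 ++ [st.2], []) else st
  else (st.1, st.2 ++ [col])

def split_problems (columns : List (List String)) : List (List (List String)) :=
  let r := columns.reverse.foldl pvStepA ([], [])
  if r.2 ≠ [] then r.1 ++ [r.2] else r.1

-- ===== PORT B =====
-- the inner 'while j < n and not all(...)' loop of Source B (returns the final j)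
def pvFindEnd (rev : List (List String)) (n j : Nat) : Nat :=
  if j < n ∧ pvBlank (rev.getD j []) = false then pvFindEnd rev n (j + 1) else j
termination_by n - j
decreasing_by omega

-- cited by pvGoB's termination proof
theorem pvFindEnd_ge (rev : List (List String)) (n : Nat) : ∀ j, j ≤ pvFindEnd rev n j := by
  intro j
  induction hk : n - j using Nat.strong_induction_on generalizing j with
  | _ k ih =>
    rw [pvFindEnd]
    split
    · next h => exact Nat.le_trans (by omega) (ih (n - (j+1)) (by omega) (j+1) rfl)
    · exact Nat.le_refl j

-- the outer 'while i < n' loop of Source B; rev[i] with 0 ≤ i < n is exactly List.getD,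
-- rev[i:j] with 0 ≤ i ≤ j is PySem.List.slice
def pvGoB (rev : List (List String)) (n i : Nat) : List (List (List String)) :=
  if i < n then
    if pvBlank (rev.getD i []) then pvGoB rev n (i + 1)
    else
      let j := pvFindEnd rev n (i + 1)
      PySem.List.slice rev (some (i : Int)) (some (j : Int)) :: pvGoB rev n j
  else []
termination_by n - i
decreasing_by
  · omega
  · have := pvFindEnd_ge rev n (i + 1); omega

-- columns[::-1] is List.reverse (PySem.List.slice?_none_none_neg_one)
def split_problems_alt (columns : List (List String)) : List (List (List String)) :=
  let rev := columns.reverse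
  pvGoB rev rev.length 0

-- ===== PRECONDITION & SPEC =====
def Spec_split_problems (columns : List (List String)) (out : List (List (List String))) : Prop := out = split_problems_alt columns
instance (columns : List (List String)) (out : List (List (List String))) : Decidable (Spec_split_problems columns out) := by unfold Spec_split_problems; infer_instance

-- ===== CLAIM (what is proved, stated in full; the proofs are below) =====
def Claim_equal_split_problems : Prop := ∀ (columns : List (List String)), Dom_split_problems columns → Spec_split_problems columns (split_problems columns)

-- ===== LEMMAS AND PROOFS =====

-- "non-blank" predicate used by the reference recursion below
def pvQ (c : List String) : Bool := !pvBlank c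

-- reference recursion: split a (reversed) column list into maximal non-blank runs
def pvGo : List (List String) → List (List (List String))
  | [] => []
  | x :: xs =>
    if pvBlank x then pvGo xs
    else (x :: xs.takeWhile pvQ) :: pvGo (xs.dropWhile pvQ)
termination_by l => l.length
decreasing_by
  · simp
  · have := List.length_dropWhile_le pvQ xs; simp; omega

theorem pvGo_cons (x : List String) (xs : List (List String)) :
    pvGo (x :: xs) =
      if pvBlank x then pvGo xs
      else (x :: xs.takeWhile pvQ) :: pvGo (xs.dropWhile pvQ) := by
  rw [pvGo]

-- A's final 'if current:' flush
def pvFinish (r : List (List (List String)) × List (List String)) : List (List (List String)) :=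
  if r.2 ≠ [] then r.1 ++ [r.2] else r.1

theorem pvStepA_shift (x : List String) (p : List (List (List String))) (c : List (List String)) :
    pvStepA (p, c) x = (p ++ (pvStepA ([], c) x).1, (pvStepA ([], c) x).2) := by
  simp only [pvStepA]
  split_ifs <;> simp

theorem pvShift (l : List (List String)) :
    ∀ (p : List (List (List String))) (c : List (List String)),
      l.foldl pvStepA (p, c) =
        (p ++ (l.foldl pvStepA ([], c)).1, (l.foldl pvStepA ([], c)).2) := by
  induction l with
  | nil => intro p c; simp
  | cons x l ih =>
    intro p c
    rw [List.foldl_cons, List.foldl_cons, pvStepA_shift]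
    obtain ⟨a, b⟩ := pvStepA ([], c) x
    rw [ih (p ++ a) b, ih a b, List.append_assoc]

theorem pvFinish_append (p a : List (List (List String))) (b : List (List String)) :
    pvFinish (p ++ a, b) = p ++ pvFinish (a, b) := by
  simp only [pvFinish]
  split_ifs <;> simp

theorem pvMain (l : List (List String)) :
    ∀ c : List (List String),
      pvFinish (l.foldl pvStepA ([], c)) =
        if c = [] then pvGo l
        else (c ++ l.takeWhile pvQ) :: pvGo (l.dropWhile pvQ) := by
  induction l with
  | nil =>
    intro c
    by_cases hc : c = [] <;> simp [hc, pvFinish, pvGo]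
  | cons x xs ih =>
    intro c
    rw [List.foldl_cons]
    by_cases hb : pvBlank x
    · by_cases hc : c = []
      · subst hc
        have : pvStepA ([], ([] : List (List String))) x = ([], []) := by
          simp [pvStepA, hb]
        rw [this, ih]
        simp [pvGo, hb]
      · have : pvStepA ([], c) x = ([c], []) := by
          simp [pvStepA, hb, hc]
        rw [this, pvShift, pvFinish_append, ih]
        have hq : pvQ x = false := by simp [pvQ, hb]
        simp [hc, hq, pvGo, hb]
    · have : pvStepA ([], c) x = ([], c ++ [x]) := by
        simp [pvStepA, hb]
      rw [this, ih]
      have hcx : c ++ [x] ≠ [] := by simp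
      have hq : pvQ x = true := by simp [pvQ, hb]
      by_cases hc : c = []
      · subst hc
        simp [pvGo, hb]
      · simp [hcx, hc, hq]

theorem pvFindEnd_spec (rev : List (List String)) :
    ∀ j, j ≤ rev.length →
      (rev.drop j).takeWhile pvQ = (rev.drop j).take (pvFindEnd rev rev.length j - j) ∧
      (rev.drop j).dropWhile pvQ = rev.drop (pvFindEnd rev rev.length j) := by
  intro j
  induction hk : rev.length - j using Nat.strong_induction_on generalizing j with
  | _ k ih =>
    intro hj
    rw [pvFindEnd]
    by_cases hlt : j < rev.length
    · have hdrop : rev.drop j = rev[j] :: rev.drop (j + 1) := List.drop_eq_getElem_cons hlt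
      have hgd : rev.getD j [] = rev[j] := List.getD_eq_getElem rev [] hlt
      by_cases hb : pvBlank rev[j]
      · have hq : pvQ rev[j] = false := by simp [pvQ, hb]
        have : ¬ (j < rev.length ∧ pvBlank (rev.getD j []) = false) := by
          rw [hgd]; simp [hb]
        rw [if_neg this]
        constructor
        · rw [hdrop, List.takeWhile_cons, hq, Nat.sub_self, List.take_zero]
          simp
        · conv_lhs => rw [hdrop]
          rw [List.dropWhile_cons, hq]
          simp
      · have hq : pvQ rev[j] = true := by simp [pvQ, hb]
        have hcond : (j < rev.length ∧ pvBlank (rev.getD j []) = false) := by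
          rw [hgd]; exact ⟨hlt, by simp [hb]⟩
        rw [if_pos hcond]
        have hge := pvFindEnd_ge rev rev.length (j + 1)
        obtain ⟨ht, hd⟩ := ih (rev.length - (j + 1)) (by omega) (j + 1) rfl (by omega)
        constructor
        · rw [hdrop]
          rw [List.takeWhile_cons, if_pos hq, ht]
          have : pvFindEnd rev rev.length (j + 1) - j =
              (pvFindEnd rev rev.length (j + 1) - (j + 1)) + 1 := by omega
          rw [this, List.take_succ_cons]
        · rw [hdrop, List.dropWhile_cons, if_pos hq, hd]
    · have hj' : j = rev.length := by omega
      have : ¬ (j < rev.length ∧ pvBlank (rev.getD j []) = false) := by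
        intro h; omega
      rw [if_neg this]
      subst hj'
      simp

theorem pvGoB_eq (rev : List (List String)) :
    ∀ i, pvGoB rev rev.length i = pvGo (rev.drop i) := by
  intro i
  induction hk : rev.length - i using Nat.strong_induction_on generalizing i with
  | _ k ih =>
    rw [pvGoB]
    by_cases hlt : i < rev.length
    · have hdrop : rev.drop i = rev[i] :: rev.drop (i + 1) := List.drop_eq_getElem_cons hlt
      have hgd : rev.getD i [] = rev[i] := List.getD_eq_getElem rev [] hlt
      rw [if_pos hlt, hgd]
      by_cases hb : pvBlank rev[i]
      · rw [if_pos hb, ih (rev.length - (i + 1)) (by omega) (i + 1) rfl]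
        conv_rhs => rw [hdrop]
        rw [pvGo_cons, if_pos hb]
      · rw [if_neg hb]
        show PySem.List.slice rev (some (i : Int))
            (some ((pvFindEnd rev rev.length (i + 1) : Nat) : Int)) ::
            pvGoB rev rev.length (pvFindEnd rev rev.length (i + 1)) = pvGo (List.drop i rev)
        have hge := pvFindEnd_ge rev rev.length (i + 1)
        obtain ⟨ht, hd⟩ := pvFindEnd_spec rev (i + 1) (by omega)
        have hslice : PySem.List.slice rev (some (i : Int))
            (some ((pvFindEnd rev rev.length (i + 1) : Nat) : Int)) =
            (rev.drop i).take (pvFindEnd rev rev.length (i + 1) - i) :=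
          PySem.List.slice_natCast rev i (pvFindEnd rev rev.length (i + 1))
        rw [hslice, ih (rev.length - pvFindEnd rev rev.length (i + 1)) (by omega)
              (pvFindEnd rev rev.length (i + 1)) rfl]
        rw [← hd, hdrop]
        have : pvFindEnd rev rev.length (i + 1) - i =
            (pvFindEnd rev rev.length (i + 1) - (i + 1)) + 1 := by omega
        rw [this, List.take_succ_cons, ← ht, pvGo_cons, if_neg hb]
    · rw [if_neg hlt]
      rw [List.drop_eq_nil_of_le (by omega), pvGo]

-- ===== VERDICT (by name: the statement is the Claim_ definition above) =====
theorem split_problems_spec : Claim_equal_split_problems := by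
  intro columns _
  show split_problems columns = split_problems_alt columns
  have hA : split_problems columns = pvFinish (columns.reverse.foldl pvStepA ([], [])) := rfl
  rw [hA, pvMain columns.reverse []]
  rw [if_pos rfl]
  have hB : split_problems_alt columns = pvGoB columns.reverse columns.reverse.length 0 := rfl
  rw [hB, pvGoB_eq columns.reverse 0, List.drop_zero]
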